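-- pv_equiv track=rewrite | github.com/tsaanghwang/Yime | syllable/analysis/onset_rhyme/pinyin_classifier.py | classify_pinyin
-- ===== SOURCE A (Python) =====
-- from collections import defaultdict
--
-- def classify_pinyin(pinyin_dict):
--     """
--     分类拼音到声母类别
--
--     参数:
--         pinyin_dict: 拼音到汉字的字典
--
--     返回:
--         按声母分类的字典
--     """
--     classified = defaultdict(list)
--
--     for pinyin in pinyin_dict.keys():
--         # 处理零声母情况
--         if pinyin[0] in {'a', 'e', 'o'}:
--             initial = pinyin[0]
--         # 处理平翘舌音
--         elif pinyin.startswith('zh'):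
--             initial = 'zh'
--         elif pinyin.startswith('ch'):
--             initial = 'ch'
--         elif pinyin.startswith('sh'):
--             initial = 'sh'
--         elif pinyin.startswith('z'):
--             initial = 'z'
--         elif pinyin.startswith('c'):
--             initial = 'c'
--         elif pinyin.startswith('s'):
--             initial = 's'
--         # 其他声母取第一个字母
--         else:
--             initial = pinyin[0]
--
--         classified[initial].append(pinyin)
--
--     return classified
-- ===== SOURCE B (Python) =====
-- from collections import defaultdict
--
--
-- def classify_pinyin(pinyin_dict):
--     """
--     分类拼音到声母类别 — staged group-by: compute each key's initial in one
--     closed-form step (its 2-char slice when that is zh/ch/sh, else its first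
--     letter), then for each distinct initial (first-occurrence order) select
--     the matching keys.
--     """
--     keys = list(pinyin_dict)
--     initials = [p[:2] if p[:2] in ('zh', 'ch', 'sh') else p[0] for p in keys]
--     classified = defaultdict(list)
--     for ini in dict.fromkeys(initials):
--         classified[ini] = [p for i, p in zip(initials, keys) if i == ini]
--     return classified
-- ===== Notes on version B (the rewrite author's own statement) =====
-- stated objective: alternative
-- what changed: Replaces A's single-pass eight-way branch cascade accumulating into a defaultdict with a staged group-by: a closed-form initial (the 2-char slice when it is zh/ch/sh, else the first letter) computed for every key in one pass, then the distinct initials deduplicated in first-occurrence order and each group selected by a filter over the (initial, key) pairs.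
import Mathlib
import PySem

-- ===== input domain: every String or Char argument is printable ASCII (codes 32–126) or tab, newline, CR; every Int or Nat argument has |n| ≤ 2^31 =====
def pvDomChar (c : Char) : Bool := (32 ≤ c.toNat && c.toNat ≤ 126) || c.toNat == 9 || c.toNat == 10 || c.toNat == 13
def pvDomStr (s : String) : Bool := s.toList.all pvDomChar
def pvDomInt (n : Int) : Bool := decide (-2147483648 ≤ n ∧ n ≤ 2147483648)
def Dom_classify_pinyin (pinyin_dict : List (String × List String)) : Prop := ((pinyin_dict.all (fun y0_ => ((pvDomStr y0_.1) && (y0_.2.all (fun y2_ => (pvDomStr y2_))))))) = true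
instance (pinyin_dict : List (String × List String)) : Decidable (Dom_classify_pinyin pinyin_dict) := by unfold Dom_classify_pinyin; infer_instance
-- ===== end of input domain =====

-- B replaces A's single-pass branch-cascade accumulation with a staged group-by:
-- a closed-form initial per key, dedup of the initials, then one selection pass per group.

-- ===== PORT A =====
def classify_pinyin (pinyin_dict : List (String × List String)) : List (String × List String) :=
  (((pinyin_dict.map (fun kv => kv.1)).foldl
      (fun (classified : PySem.Dict String (List String)) pinyin =>
        let initial : String :=
          match PySem.Str.pyGet? pinyin 0 with
          | none => pinyin   -- unreachable under Pre_: Python raises IndexError on an empty key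
          | some c =>
            if c = 'a' ∨ c = 'e' ∨ c = 'o' then String.ofList [c]
            else if PySem.Str.startswith pinyin "zh" then "zh"
            else if PySem.Str.startswith pinyin "ch" then "ch"
            else if PySem.Str.startswith pinyin "sh" then "sh"
            else if PySem.Str.startswith pinyin "z" then "z"
            else if PySem.Str.startswith pinyin "c" then "c"
            else if PySem.Str.startswith pinyin "s" then "s"
            else String.ofList [c]
        PySem.Dict.modify classified initial [] (fun l => l ++ [pinyin]))
      PySem.Dict.empty)).items

-- ===== PORT B =====
-- Source B's closed-form initial: p[:2] if p[:2] in ('zh','ch','sh') else p[0]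
def pvInitial (p : String) : String :=
  let p2 := PySem.Str.slice p none (some 2)
  if p2 = "zh" ∨ p2 = "ch" ∨ p2 = "sh" then p2
  else
    match PySem.Str.pyGet? p 0 with
    | some c => String.ofList [c]
    | none => ""   -- unreachable under Pre_: Python raises IndexError on an empty key

def classify_pinyin_alt (pinyin_dict : List (String × List String)) : List (String × List String) :=
  let keys := pinyin_dict.map (fun kv => kv.1)
  let initials := keys.map pvInitial
  (((PySem.List.dedup initials).foldl
      (fun (classified : PySem.Dict String (List String)) ini =>
        classified.insert ini
          (((initials.zip keys).filter (fun q => q.1 == ini)).map (fun q => q.2)))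
      PySem.Dict.empty)).items

-- ===== PRECONDITION & SPEC =====
-- Pre_ excludes dictionaries with an empty-string key: there both Pythons raise IndexError (pinyin[0]).
def Pre_classify_pinyin (pinyin_dict : List (String × List String)) : Prop :=
  ∀ kv ∈ pinyin_dict, kv.1 ≠ ""
instance (pinyin_dict : List (String × List String)) : Decidable (Pre_classify_pinyin pinyin_dict) := by unfold Pre_classify_pinyin; infer_instance

def pvWitness_classify_pinyin : (List (String × List String)) :=
  [("zhang", ["A"]), ("chi", []), ("an", ["B"]), ("si", []), ("ma", [])]

def Spec_classify_pinyin (pinyin_dict : List (String × List String)) (out : List (String × List String)) : Prop := out = classify_pinyin_alt pinyin_dict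
instance (pinyin_dict : List (String × List String)) (out : List (String × List String)) : Decidable (Spec_classify_pinyin pinyin_dict out) := by unfold Spec_classify_pinyin; infer_instance

-- ===== CLAIM (what is proved, stated in full; the proofs are below) =====
def Claim_equal_classify_pinyin : Prop := ∀ (pinyin_dict : List (String × List String)), Dom_classify_pinyin pinyin_dict → Pre_classify_pinyin pinyin_dict → Spec_classify_pinyin pinyin_dict (classify_pinyin pinyin_dict)

-- ===== LEMMAS AND PROOFS =====

-- A's eight-way cascade computes exactly B's closed-form initial on every non-empty string
lemma initial_eq (s : String) (h : s ≠ "") :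
    (match PySem.Str.pyGet? s 0 with
     | none => s
     | some c =>
       if c = 'a' ∨ c = 'e' ∨ c = 'o' then String.ofList [c]
       else if PySem.Str.startswith s "zh" then "zh"
       else if PySem.Str.startswith s "ch" then "ch"
       else if PySem.Str.startswith s "sh" then "sh"
       else if PySem.Str.startswith s "z" then "z"
       else if PySem.Str.startswith s "c" then "c"
       else if PySem.Str.startswith s "s" then "s"
       else String.ofList [c]) = pvInitial s := by
  have hnil : s.toList ≠ [] := fun hn => h (by
    have := congrArg String.ofList hn
    simpa using this)
  have hslice : (PySem.Str.slice s none (some 2)).toList = s.toList.take 2 := by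
    simp [PySem.Str.toList_slice]
    exact_mod_cast PySem.List.slice_to_natCast s.toList 2
  cases hcs : s.toList with
  | nil => exact absurd hcs hnil
  | cons c rest =>
    rw [hcs] at hslice
    simp only [pvInitial, ← String.toList_inj, hslice]
    simp only [PySem.Str.startswith_eq, PySem.Chars.startswith,
      PySem.Str.pyGet?_eq, PySem.Chars.pyGet?_eq_listPyGet?, hcs,
      PySem.List.pyGet?_zero_cons]
    cases rest with
    | nil =>
      by_cases haeo : c = 'a' ∨ c = 'e' ∨ c = 'o'
      · rcases haeo with rfl | rfl | rfl <;> simp_all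
      · rw [if_neg haeo]; split_ifs <;> simp_all <;> tauto
    | cons c2 rest2 =>
      by_cases haeo : c = 'a' ∨ c = 'e' ∨ c = 'o'
      · rcases haeo with rfl | rfl | rfl <;> simp_all
      · rw [if_neg haeo]; split_ifs <;> simp_all <;> tauto

-- A's accumulating fold (with the initial already in B's closed form) has exactly
-- B's staged group-by as its items list
lemma grouping_eq (keys : List String) :
    ((keys.foldl
        (fun (cl : PySem.Dict String (List String)) p =>
          cl.modify (pvInitial p) [] (fun l => l ++ [p]))
        PySem.Dict.empty)).items
    =
    ((PySem.List.dedup (keys.map pvInitial)).foldl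
        (fun (cl : PySem.Dict String (List String)) ini =>
          cl.insert ini
            ((((keys.map pvInitial).zip keys).filter (fun q => q.1 == ini)).map (fun q => q.2)))
        PySem.Dict.empty).items := by
  set initials := keys.map pvInitial with hinit
  set dA := keys.foldl
      (fun (cl : PySem.Dict String (List String)) p =>
        cl.modify (pvInitial p) [] (fun l => l ++ [p]))
      PySem.Dict.empty with hdA
  have hzip : initials.zip keys = keys.map (fun p => (pvInitial p, p)) := by
    have h := (List.zip_map' (f := pvInitial) (g := fun p => p) (l := keys))
    simpa [hinit] using h
  have hpairs : dA = (keys.map (fun p => (pvInitial p, p))).foldl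
      (fun (d : PySem.Dict String (List String)) q =>
        d.modify q.1 [] (fun l => l ++ [q.2])) PySem.Dict.empty := by
    rw [List.foldl_map]
  have hnodup : dA.keys.Nodup := by
    rw [hdA]
    exact PySem.Dict.nodup_keys_foldl_modify_key keys pvInitial []
      (fun d x => fun l => l ++ [x]) PySem.Dict.empty (by simp)
  have hkeysA : dA.keys = PySem.List.dedup initials := by
    rw [hdA]
    rw [PySem.Dict.keys_foldl_modify_key]
    simp [PySem.Set.update, PySem.Set.ofList, hinit]
  have hget : ∀ k, dA.getD k [] =
      (((keys.map (fun p => (pvInitial p, p))).filter (fun q => q.1 == k)).map (fun q => q.2)) := by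
    intro k
    rw [hpairs, PySem.Dict.getD_foldl_modify_append]
    simp
  have hB : ((PySem.List.dedup initials).foldl
        (fun (cl : PySem.Dict String (List String)) ini =>
          cl.insert ini
            (((initials.zip keys).filter (fun q => q.1 == ini)).map (fun q => q.2)))
        PySem.Dict.empty).items
      = (PySem.List.dedup initials).map
          (fun i => (i, ((initials.zip keys).filter (fun q => q.1 == i)).map (fun q => q.2))) := by
    have := PySem.Dict.items_foldl_insert_fresh (l := PySem.List.dedup initials)
      (k := fun a => a)
      (v := fun i => ((initials.zip keys).filter (fun q => q.1 == i)).map (fun q => q.2))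
      (d := PySem.Dict.empty) (by simp) (by simp)
    simpa using this
  rw [hB, PySem.Dict.items_eq_map_keys dA hnodup [], hkeysA]
  apply List.map_congr_left
  intro i _
  rw [hget i, hzip]

-- ===== VERDICT (by name: the statement is the Claim_ definition above) =====
theorem classify_pinyin_spec : Claim_equal_classify_pinyin := by
  intro d _ hpre
  unfold Spec_classify_pinyin classify_pinyin classify_pinyin_alt
  have hstep : ((d.map (fun kv => kv.1)).foldl
      (fun (classified : PySem.Dict String (List String)) pinyin =>
        let initial : String :=
          match PySem.Str.pyGet? pinyin 0 with
          | none => pinyin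
          | some c =>
            if c = 'a' ∨ c = 'e' ∨ c = 'o' then String.ofList [c]
            else if PySem.Str.startswith pinyin "zh" then "zh"
            else if PySem.Str.startswith pinyin "ch" then "ch"
            else if PySem.Str.startswith pinyin "sh" then "sh"
            else if PySem.Str.startswith pinyin "z" then "z"
            else if PySem.Str.startswith pinyin "c" then "c"
            else if PySem.Str.startswith pinyin "s" then "s"
            else String.ofList [c]
        PySem.Dict.modify classified initial [] (fun l => l ++ [pinyin]))
      PySem.Dict.empty)
      = ((d.map (fun kv => kv.1)).foldl
          (fun (cl : PySem.Dict String (List String)) p =>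
            cl.modify (pvInitial p) [] (fun l => l ++ [p]))
          PySem.Dict.empty) := by
    apply PySem.List.foldl_congr_mem
    intro acc s hs
    have hne : s ≠ "" := by
      rcases List.mem_map.mp hs with ⟨kv, hkv, rfl⟩
      exact hpre kv hkv
    simp only [initial_eq s hne]
  rw [hstep]
  exact grouping_eq (d.map (fun kv => kv.1))
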